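-- pv_equiv track=rewrite | github.com/pypi-data/pypi-mirror-258 | packages/edit-distance-correction/edit_distance_correction-1.1.1-py3-none-any.whl/edit_distance_correction/utils.py | pinyin_split
-- ===== SOURCE A (Python) =====
-- def pinyin_split(pinyin, valid_pinyin):
--     res = []
--     def split_helper(pinyin, pos, before_res):
--         if pos >= len(pinyin):
--             res.append(before_res)
--         for i in range(pos, len(pinyin)+1):
--             if pinyin[pos:i] in valid_pinyin:
--                 before_res_copy = before_res.copy()
--                 before_res_copy.append(pinyin[pos:i])
--                 split_helper(pinyin, i, before_res_copy)
--     split_helper(pinyin, 0, [])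
--     #暂时取最小粒度切分结果，最长的一个
--     if len(res) == 0: return None
--     return sorted(res, key=lambda x: len(x), reverse=True)[0]
-- ===== SOURCE B (Python) =====
-- def pinyin_split(pinyin, valid_pinyin):
--     n = len(pinyin)
--     vs = set(valid_pinyin)
--     # best[pos] = max number of segments in a full segmentation of pinyin[pos:], or None
--     best = [None] * (n + 1)
--     best[n] = 0
--     for pos in range(n - 1, -1, -1):
--         b = None
--         for i in range(pos + 1, n + 1):
--             if pinyin[pos:i] in vs and best[i] is not None:
--                 c = best[i] + 1
--                 if b is None or c > b:
--                     b = c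
--         best[pos] = b
--     if best[0] is None:
--         return None
--     # greedy reconstruction: shortest segment first, matching DFS-first tie-break
--     out = []
--     pos = 0
--     while pos < n:
--         for i in range(pos + 1, n + 1):
--             if pinyin[pos:i] in vs and best[i] is not None and best[i] + 1 == best[pos]:
--                 out.append(pinyin[pos:i])
--                 pos = i
--                 break
--     return out
-- ===== Notes on version B (the rewrite author's own statement) =====
-- stated objective: faster
-- what changed: A enumerates every segmentation by exponential DFS and stable-sorts them to pick the longest; B computes a DP table best[pos] = max segment count of each suffix in O(n^2) and greedily reconstructs the shortest-first (DFS-first) maximal segmentation, never materialising the segmentation list.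
import Mathlib
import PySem

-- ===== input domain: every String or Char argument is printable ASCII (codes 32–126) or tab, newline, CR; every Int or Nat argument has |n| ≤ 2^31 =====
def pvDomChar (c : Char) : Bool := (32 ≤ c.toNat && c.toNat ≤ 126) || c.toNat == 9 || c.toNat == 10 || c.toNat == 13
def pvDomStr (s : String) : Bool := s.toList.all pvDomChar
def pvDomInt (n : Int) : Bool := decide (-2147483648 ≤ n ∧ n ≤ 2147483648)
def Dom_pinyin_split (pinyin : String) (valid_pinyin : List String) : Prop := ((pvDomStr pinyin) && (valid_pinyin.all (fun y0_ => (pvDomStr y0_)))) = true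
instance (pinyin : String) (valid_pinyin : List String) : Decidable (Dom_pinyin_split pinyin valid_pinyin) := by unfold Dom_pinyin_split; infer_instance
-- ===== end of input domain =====

-- B replaces A's exponential DFS enumeration + stable sort by an O(n^2) DP table of maximal
-- segment counts plus a greedy shortest-segment-first reconstruction (objective: faster).

-- ===== PORT A =====
-- split_helper(pinyin, pos, before_res), with `res` threaded as an accumulator.
-- Fuel makes the recursion structural: under Pre_ ('' not in valid_pinyin) every recursive
-- call strictly increases pos, so fuel |pinyin|+1 is never exhausted.
def pvHelperA (cs : List Char) (valid : List (List Char)) :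
    Nat → Int → List (List Char) → List (List (List Char)) → List (List (List Char))
  | 0, _, _, res => res
  | fuel+1, pos, before, res =>
    (PySem.List.pyRange pos ((cs.length : Int) + 1) 1).foldl
      (fun r i =>
        if PySem.List.slice cs (some pos) (some i) ∈ valid then
          pvHelperA cs valid fuel i (before ++ [PySem.List.slice cs (some pos) (some i)]) r
        else r)
      (if (cs.length : Int) ≤ pos then res ++ [before] else res)

def pvCoreA (cs : List Char) (valid : List (List Char)) : Option (List (List Char)) :=
  let res := pvHelperA cs valid (cs.length + 1) 0 [] []
  if res.length = 0 then none
  else PySem.List.pyGet? (PySem.List.sorted res (fun x => x.length) true) 0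

def pinyin_split (pinyin : String) (valid_pinyin : List String) : Option (List String) :=
  (pvCoreA pinyin.toList (valid_pinyin.map String.toList)).map (List.map String.ofList)

-- ===== PORT B =====
-- inner loop of the DP pass: b = running max of best[i]+1 over valid segments pinyin[pos:i];
-- tbl is the already-computed suffix of the table, tbl[j] = best[pos+1+j].
def pvBestStep (cs : List Char) (valid : List (List Char)) (pos : Nat) (tbl : List (Option Nat)) : Option Nat :=
  (List.range' (pos+1) (cs.length - pos)).foldl
    (fun (b : Option Nat) (i : Nat) =>
      if PySem.List.slice cs (some (pos : Int)) (some (i : Int)) ∈ valid then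
        match tbl.getD (i - pos - 1) none with
        | none => b
        | some v =>
          match b with
          | none => some (v + 1)
          | some b0 => if b0 < v + 1 then some (v + 1) else some b0
      else b)
    none

-- the backward loop `for pos in range(n-1, -1, -1)`; after k steps the table is [best[n-k], …, best[n]]
def pvBestList (cs : List Char) (valid : List (List Char)) : Nat → List (Option Nat)
  | 0 => [some 0]
  | k+1 => pvBestStep cs valid (cs.length - (k+1)) (pvBestList cs valid k) :: pvBestList cs valid k

-- the inner `for … break` of the reconstruction: first i with a valid segment that keeps the count maximal
def pvFind (cs : List Char) (valid : List (List Char)) (tbl : List (Option Nat)) (pos : Nat) : Option Nat :=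
  (List.range' (pos+1) (cs.length - pos)).find? (fun (i : Nat) =>
    decide (PySem.List.slice cs (some (pos : Int)) (some (i : Int)) ∈ valid) &&
    (match tbl.getD i none, tbl.getD pos none with
     | some v, some c => v + 1 == c
     | _, _ => false))

-- the `while pos < n` loop; pos strictly increases, so fuel n suffices
def pvRebuild (cs : List Char) (valid : List (List Char)) (tbl : List (Option Nat)) :
    Nat → Nat → List (List Char) → List (List Char)
  | 0, _, out => out
  | fuel+1, pos, out =>
    if pos < cs.length then
      match pvFind cs valid tbl pos with
      | some i => pvRebuild cs valid tbl fuel i (out ++ [PySem.List.slice cs (some (pos : Int)) (some (i : Int))])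
      | none => out
    else out

def pvCoreB (cs : List Char) (valid : List (List Char)) : Option (List (List Char)) :=
  let tbl := pvBestList cs valid cs.length
  if tbl.getD 0 none = none then none
  else some (pvRebuild cs valid tbl cs.length 0 [])

def pinyin_split_alt (pinyin : String) (valid_pinyin : List String) : Option (List String) :=
  (pvCoreB pinyin.toList (valid_pinyin.map String.toList)).map (List.map String.ofList)

-- ===== PRECONDITION & SPEC =====
-- Pre_ excludes exactly the inputs where A raises: if '' ∈ valid_pinyin, split_helper recurses
-- forever on the empty slice and A dies with RecursionError.
def Pre_pinyin_split (pinyin : String) (valid_pinyin : List String) : Prop := "" ∉ valid_pinyin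
instance (pinyin : String) (valid_pinyin : List String) : Decidable (Pre_pinyin_split pinyin valid_pinyin) := by unfold Pre_pinyin_split; infer_instance
def pvWitness_pinyin_split : String × List String := ("nihao", ["ni", "hao", "ha", "o"])

def Spec_pinyin_split (pinyin : String) (valid_pinyin : List String) (out : Option (List String)) : Prop := out = pinyin_split_alt pinyin valid_pinyin
instance (pinyin : String) (valid_pinyin : List String) (out : Option (List String)) : Decidable (Spec_pinyin_split pinyin valid_pinyin out) := by unfold Spec_pinyin_split; infer_instance

-- ===== CLAIM (what is proved, stated in full; the proofs are below) =====
def Claim_equal_pinyin_split : Prop := ∀ (pinyin : String) (valid_pinyin : List String), Dom_pinyin_split pinyin valid_pinyin → Pre_pinyin_split pinyin valid_pinyin → Spec_pinyin_split pinyin valid_pinyin (pinyin_split pinyin valid_pinyin)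

-- ===== LEMMAS AND PROOFS =====

-- the segment pinyin[pos:i] at Nat indices
def pvSeg (cs : List Char) (pos i : Nat) : List Char := (cs.drop pos).take (i - pos)

-- reference object: the list of ALL full segmentations of cs[pos:], in A's DFS order
def segsFrom (cs : List Char) (V : List (List Char)) (pos : Nat) : List (List (List Char)) :=
  (if cs.length ≤ pos then [[]] else []) ++
  (List.range' (pos+1) (cs.length - pos)).attach.flatMap
    (fun x =>
      if pvSeg cs pos x.1 ∈ V then (segsFrom cs V x.1).map (fun t => pvSeg cs pos x.1 :: t) else [])
termination_by cs.length - pos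
decreasing_by
  have hx := x.2
  rw [List.mem_range'_1] at hx
  omega

lemma pv_attach_flatMap {α β : Type} (l : List α) (f : α → List β) :
    l.attach.flatMap (fun x => f x.1) = l.flatMap f :=
  calc l.attach.flatMap (fun x => f x.1)
      = (l.attach.map Subtype.val).flatMap f := (List.flatMap_map _ _ _).symm
    _ = l.flatMap f := by rw [List.attach_map_subtype_val]

lemma segsFrom_eq (cs : List Char) (V : List (List Char)) (pos : Nat) :
    segsFrom cs V pos =
      (if cs.length ≤ pos then [[]] else []) ++
      (List.range' (pos+1) (cs.length - pos)).flatMap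
        (fun i => if pvSeg cs pos i ∈ V then (segsFrom cs V i).map (fun t => pvSeg cs pos i :: t) else []) := by
  rw [segsFrom]
  rw [pv_attach_flatMap (List.range' (pos+1) (cs.length - pos))
    (fun i => if pvSeg cs pos i ∈ V then (segsFrom cs V i).map (fun t => pvSeg cs pos i :: t) else [])]

lemma segsFrom_end (cs : List Char) (V : List (List Char)) (pos : Nat) (h : cs.length ≤ pos) :
    segsFrom cs V pos = [[]] := by
  have h0 : cs.length - pos = 0 := by omega
  rw [segsFrom_eq, h0, if_pos h]
  simp

-- ---- A side ----
lemma pyRange_natCast_one (a b : Nat) :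
    PySem.List.pyRange (a : Int) (b : Int) 1 = (List.range' a (b - a)).map (fun k : Nat => (k : Int)) := by
  rw [PySem.List.pyRange]
  rw [if_neg (by norm_num)]
  by_cases hab : a < b
  · rw [if_pos (by norm_num), if_pos (by exact_mod_cast hab)]
    have hc : (((b : Int) - a + 1 - 1) / 1).toNat = b - a := by
      rw [Int.ediv_one]; omega
    rw [hc, List.range'_eq_map_range, List.map_map]
    show List.map (fun k : Nat => (a : Int) + 1 * (k : Int)) (List.range (b - a)) = _
    apply List.map_congr_left
    intro k _
    simp only [Function.comp_apply]
    push_cast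
    ring
  · rw [if_pos (by norm_num), if_neg (by exact_mod_cast hab)]
    have hb : b - a = 0 := by omega
    rw [hb]
    simp

lemma slice_eq_pvSeg (cs : List Char) (pos i : Nat) :
    PySem.List.slice cs (some (pos : Int)) (some (i : Int)) = pvSeg cs pos i := by
  rw [PySem.List.slice_natCast]; rfl

lemma pvSeg_self (cs : List Char) (pos : Nat) : pvSeg cs pos pos = [] := by
  simp [pvSeg]

lemma helperA_eq (cs : List Char) (V : List (List Char)) (hV : [] ∉ V) :
    ∀ (fuel : Nat) (pos : Nat) (before : List (List Char)) (res : List (List (List Char))),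
      pos ≤ cs.length → cs.length + 1 ≤ fuel + pos →
      pvHelperA cs V fuel (pos : Int) before res = res ++ (segsFrom cs V pos).map (fun t => before ++ t) := by
  intro fuel
  induction fuel with
  | zero => intro pos before res h1 h2; omega
  | succ f ih =>
    intro pos before res hpos hfuel
    rw [pvHelperA]
    have hr : PySem.List.pyRange (pos : Int) ((cs.length : Int) + 1) 1
        = ((pos : Nat) :: List.range' (pos+1) (cs.length - pos)).map (fun k : Nat => (k : Int)) := by
      have h1 : ((cs.length : Int) + 1) = (((cs.length + 1 : Nat)) : Int) := by push_cast; ring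
      rw [h1, pyRange_natCast_one]
      have h2 : cs.length + 1 - pos = (cs.length - pos) + 1 := by omega
      rw [h2, List.range'_succ]
    rw [hr]
    simp only [List.foldl_map, List.foldl_cons]
    rw [slice_eq_pvSeg, pvSeg_self, if_neg hV]
    have hinit : (if (cs.length : Int) ≤ ((pos : Nat) : Int) then res ++ [before] else res)
        = res ++ (if cs.length ≤ pos then [[]] else ([] : List (List (List Char)))).map (fun t => before ++ t) := by
      by_cases h : cs.length ≤ pos
      · rw [if_pos (by exact_mod_cast h), if_pos h]; simp
      · rw [if_neg (by exact_mod_cast h), if_neg h]; simp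
    rw [hinit]
    have key : ∀ (L : List Nat), (∀ j ∈ L, pos < j ∧ j ≤ cs.length) →
        ∀ (acc : List (List (List Char))),
        L.foldl (fun r (k : Nat) =>
            if PySem.List.slice cs (some ((pos : Nat) : Int)) (some ((k : Nat) : Int)) ∈ V then
              pvHelperA cs V f ((k : Nat) : Int)
                (before ++ [PySem.List.slice cs (some ((pos : Nat) : Int)) (some ((k : Nat) : Int))]) r
            else r) acc
          = acc ++ ((L.flatMap (fun i =>
              if pvSeg cs pos i ∈ V then (segsFrom cs V i).map (fun t => pvSeg cs pos i :: t) else [])).map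
                (fun t => before ++ t)) := by
      intro L
      induction L with
      | nil => intro _ acc; simp
      | cons j t iht =>
        intro hmem acc
        obtain ⟨hj1, hj2⟩ := hmem j List.mem_cons_self
        rw [List.foldl_cons, List.flatMap_cons, slice_eq_pvSeg]
        by_cases hs : pvSeg cs pos j ∈ V
        · rw [if_pos hs, if_pos hs,
            ih j (before ++ [pvSeg cs pos j]) acc (by omega) (by omega),
            iht (fun x hx => hmem x (List.mem_cons_of_mem _ hx))]
          rw [List.map_append, List.map_map, ← List.append_assoc]
          congr 2
          apply List.map_congr_left
          intro t _
          simp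
        · rw [if_neg hs, if_neg hs, iht (fun x hx => hmem x (List.mem_cons_of_mem _ hx))]
          simp
    rw [key (List.range' (pos+1) (cs.length - pos))
      (by intro j hj; rw [List.mem_range'_1] at hj; omega)]
    rw [segsFrom_eq cs V pos, List.map_append, ← List.append_assoc]

lemma head?_insertBy {α : Type} (key : α → Nat) (x : α) (acc : List α) :
    (PySem.List.insertBy (fun a b => decide (key b < key a)) x acc).head? =
      some (match acc.head? with | none => x | some m => if key m < key x then x else m) := by
  cases acc with
  | nil => simp [PySem.List.insertBy]
  | cons y ys =>
    rw [PySem.List.insertBy]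
    by_cases h : key y < key x <;> simp [h]

lemma pv_fold_insert_head {α : Type} (key : α → Nat) :
    ∀ (xs acc : List α),
      (xs.foldl (fun acc x => PySem.List.insertBy (fun a b => decide (key b < key a)) x acc) acc).head?
        = xs.foldl (fun m x => match m with
            | none => some x
            | some m' => if key m' < key x then some x else some m') acc.head? := by
  intro xs
  induction xs with
  | nil => intro acc; rfl
  | cons x t ih =>
    intro acc
    rw [List.foldl_cons, List.foldl_cons, ih, head?_insertBy]
    congr 1
    cases hh : acc.head? with
    | none => rfl
    | some y => by_cases h : key y < key x <;> simp [h]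

lemma head?_sorted_rev {α : Type} (xs : List α) (key : α → Nat) :
    (PySem.List.sorted xs key true).head? = PySem.List.max? xs key := by
  rw [PySem.List.sorted_rev_eq_foldl_insertBy, pv_fold_insert_head]
  rfl

lemma coreA_eq (cs : List Char) (V : List (List Char)) (hV : [] ∉ V) :
    pvCoreA cs V = PySem.List.max? (segsFrom cs V 0) (fun x => x.length) := by
  have hres : pvHelperA cs V (cs.length + 1) 0 [] [] = segsFrom cs V 0 := by
    have h := helperA_eq cs V hV (cs.length + 1) 0 [] [] (by omega) (by omega)
    simpa using h
  show (if (pvHelperA cs V (cs.length + 1) 0 [] []).length = 0 then none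
        else PySem.List.pyGet? (PySem.List.sorted (pvHelperA cs V (cs.length + 1) 0 [] []) (fun x => x.length) true) 0)
      = PySem.List.max? (segsFrom cs V 0) (fun x => x.length)
  rw [hres]
  by_cases h : segsFrom cs V 0 = []
  · rw [if_pos (by simp [h]), h]
    simp [PySem.List.max?]
  · rw [if_neg (by simpa [List.length_eq_zero_iff] using h)]
    rw [PySem.List.pyGet?_zero, ← List.head?_eq_getElem?, head?_sorted_rev]

-- ---- max? structure lemmas ----
-- named step function of Python max(…), so that rewriting does not fight anonymous matches
def pvStep {α : Type} (key : α → Nat) (acc : Option α) (x : α) : Option α :=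
  match acc with
  | none => some x
  | some m => if key m < key x then some x else some m

lemma pvStep_none {α : Type} (key : α → Nat) (x : α) : pvStep key none x = some x := rfl

lemma pvStep_some {α : Type} (key : α → Nat) (m x : α) :
    pvStep key (some m) x = if key m < key x then some x else some m := rfl

lemma max?_eq_foldl_pvStep {α : Type} (key : α → Nat) (xs : List α) :
    PySem.List.max? xs key = xs.foldl (pvStep key) none := rfl

lemma max?_foldl_some {α : Type} (key : α → Nat) (ys : List α) :
    ∀ a : α,
      ys.foldl (pvStep key) (some a)
      = match PySem.List.max? ys key with
        | none => some a
        | some b => if key a < key b then some b else some a := by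
  induction ys with
  | nil => intro a; simp [PySem.List.max?]
  | cons y t ih =>
    intro a
    have hcons : PySem.List.max? (y :: t) key = t.foldl (pvStep key) (some y) := by
      rw [max?_eq_foldl_pvStep, List.foldl_cons, pvStep_none]
    rw [List.foldl_cons, pvStep_some, hcons, ih y]
    by_cases hay : key a < key y
    · rw [if_pos hay, ih y]
      rcases h : PySem.List.max? t key with _ | b
      · simp [hay]
      · by_cases hyb : key y < key b <;> simp [hay, hyb] <;>
          (intro _; exfalso; omega)
    · rw [if_neg hay, ih a]
      rcases h : PySem.List.max? t key with _ | b
      · simp [hay]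
      · by_cases hyb : key y < key b <;> simp [hay, hyb] <;>
          (intro _; exfalso; omega)

lemma max?_append {α : Type} (key : α → Nat) (xs ys : List α) :
    PySem.List.max? (xs ++ ys) key =
      match PySem.List.max? xs key with
      | none => PySem.List.max? ys key
      | some a => match PySem.List.max? ys key with
        | none => some a
        | some b => if key a < key b then some b else some a := by
  rcases h : PySem.List.max? xs key with _ | a
  · rw [PySem.List.max?_eq_none_iff] at h
    subst h
    simp
  · have hfold : PySem.List.max? (xs ++ ys) key = ys.foldl (pvStep key) (some a) := by
      rw [max?_eq_foldl_pvStep, List.foldl_append, ← max?_eq_foldl_pvStep, h]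
    rw [hfold, max?_foldl_some]

lemma max?_map_cons_aux (s : List Char) (l : List (List (List Char))) :
    ∀ a : List (List Char),
      (l.map (fun t => s :: t)).foldl (pvStep (fun x => x.length)) (some (s :: a))
      = (l.foldl (pvStep (fun x => x.length)) (some a)).map (fun t => s :: t) := by
  induction l with
  | nil => intro a; rfl
  | cons x t ih =>
    intro a
    rw [List.map_cons, List.foldl_cons, List.foldl_cons, pvStep_some, pvStep_some]
    by_cases h : a.length < x.length
    · rw [if_pos (by simpa using h), if_pos (by simpa using h)]
      exact ih x
    · rw [if_neg (by simpa using h), if_neg (by simpa using h)]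
      exact ih a

lemma max?_map_cons (s : List Char) (l : List (List (List Char))) :
    PySem.List.max? (l.map (fun t => s :: t)) (fun x => x.length) =
      (PySem.List.max? l (fun x => x.length)).map (fun t => s :: t) := by
  cases l with
  | nil => rfl
  | cons x t =>
    rw [max?_eq_foldl_pvStep, max?_eq_foldl_pvStep, List.map_cons, List.foldl_cons,
      List.foldl_cons, pvStep_none, pvStep_none]
    exact max?_map_cons_aux s t x

-- ---- B side ----
def pvMerge (b : Option Nat) (c : Nat) : Option Nat :=
  match b with
  | none => some c
  | some b0 => if b0 < c then some c else some b0

def pvRunMax (b : Option Nat) (l : List Nat) : Option Nat := l.foldl pvMerge b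

-- the DP value: max number of segments over all full segmentations of cs[pos:]
def pvBV (cs : List Char) (V : List (List Char)) (pos : Nat) : Option Nat :=
  pvRunMax none ((segsFrom cs V pos).map List.length)

lemma pvMerge_some (b0 c : Nat) : pvMerge (some b0) c = some (max b0 c) := by
  simp only [pvMerge]
  split_ifs with h <;> congr 1 <;> omega

lemma pvRunMax_some (l : List Nat) : ∀ a : Nat, pvRunMax (some a) l = some (l.foldl max a) := by
  induction l with
  | nil => intro a; rfl
  | cons c t ih =>
    intro a
    show pvRunMax (pvMerge (some a) c) t = _
    rw [pvMerge_some, ih]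
    rfl

lemma pv_foldl_max_comm (l : List Nat) : ∀ a b : Nat, l.foldl max (max a b) = max a (l.foldl max b) := by
  induction l with
  | nil => intro a b; rfl
  | cons c t ih =>
    intro a b
    rw [List.foldl_cons, List.foldl_cons, max_assoc, ih]

lemma pv_foldl_max_succ (l : List Nat) : ∀ a : Nat, (l.map (· + 1)).foldl max (a + 1) = (l.foldl max a) + 1 := by
  induction l with
  | nil => intro a; rfl
  | cons c t ih =>
    intro a
    rw [List.map_cons, List.foldl_cons, List.foldl_cons]
    rw [show max (a+1) (c+1) = (max a c) + 1 from Nat.succ_max_succ a c]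
    exact ih (max a c)

lemma pvRunMax_map_succ (l : List Nat) (b : Option Nat) :
    pvRunMax b (l.map (· + 1)) =
      match pvRunMax none l with
      | none => b
      | some v => pvMerge b (v + 1) := by
  cases l with
  | nil => cases b <;> rfl
  | cons c t =>
    have hnone : pvRunMax none (c :: t) = some (t.foldl max c) := by
      show pvRunMax (pvMerge none c) t = _
      show pvRunMax (some c) t = _
      rw [pvRunMax_some]
    rw [hnone]
    cases b with
    | none =>
      show pvRunMax (pvMerge none (c+1)) (t.map (· + 1)) = _
      show pvRunMax (some (c+1)) (t.map (· + 1)) = _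
      rw [pvRunMax_some, pv_foldl_max_succ]
      rfl
    | some b0 =>
      show pvRunMax (pvMerge (some b0) (c+1)) (t.map (· + 1)) = _
      rw [pvMerge_some, pvRunMax_some, pv_foldl_max_comm, pv_foldl_max_succ]
      show _ = pvMerge (some b0) (List.foldl max c t + 1)
      rw [pvMerge_some]

lemma max?_map_key_aux {α : Type} (key : α → Nat) (l : List α) :
    ∀ a : α,
      ((l.foldl (pvStep key) (some a)).map key)
      = pvRunMax (some (key a)) (l.map key) := by
  induction l with
  | nil => intro a; rfl
  | cons x t ih =>
    intro a
    rw [List.foldl_cons, List.map_cons, pvStep_some]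
    show _ = pvRunMax (pvMerge (some (key a)) (key x)) (t.map key)
    by_cases h : key a < key x
    · rw [if_pos h, show pvMerge (some (key a)) (key x) = some (key x) by simp [pvMerge, h]]
      exact ih x
    · rw [if_neg h, show pvMerge (some (key a)) (key x) = some (key a) by simp [pvMerge, h]]
      exact ih a

lemma max?_map_key {α : Type} (key : α → Nat) (l : List α) :
    (PySem.List.max? l key).map key = pvRunMax none (l.map key) := by
  cases l with
  | nil => rfl
  | cons x t =>
    rw [max?_eq_foldl_pvStep, List.foldl_cons, pvStep_none, List.map_cons]
    show _ = pvRunMax (pvMerge none (key x)) (t.map key)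
    show _ = pvRunMax (some (key x)) (t.map key)
    exact max?_map_key_aux key t x

lemma runMax_branch (cs : List Char) (V : List (List Char)) (b : Option Nat) (pos i : Nat) :
    pvRunMax b ((if pvSeg cs pos i ∈ V then (segsFrom cs V i).map (fun t => pvSeg cs pos i :: t) else []).map List.length) =
      if pvSeg cs pos i ∈ V then
        (match pvBV cs V i with
         | none => b
         | some v => pvMerge b (v + 1))
      else b := by
  by_cases h : pvSeg cs pos i ∈ V
  · rw [if_pos h, if_pos h]
    have hmap : ((segsFrom cs V i).map (fun t => pvSeg cs pos i :: t)).map List.length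
        = ((segsFrom cs V i).map List.length).map (· + 1) := by
      rw [List.map_map, List.map_map]
      apply List.map_congr_left
      intro t _
      simp
    rw [hmap, pvRunMax_map_succ]
    rfl
  · rw [if_neg h, if_neg h]
    rfl

lemma foldl_runMax_flatMap {γ : Type} (g : γ → List (List (List Char))) :
    ∀ (L : List γ) (b : Option Nat),
      L.foldl (fun b i => pvRunMax b ((g i).map List.length)) b =
      pvRunMax b ((L.flatMap g).map List.length) := by
  intro L
  induction L with
  | nil => intro b; rfl
  | cons i t ih =>
    intro b
    rw [List.foldl_cons, ih, List.flatMap_cons, List.map_append]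
    show _ = (((g i).map List.length) ++ ((t.flatMap g).map List.length)).foldl pvMerge b
    rw [List.foldl_append]
    rfl

lemma getD_map_range' (f : Nat → Option Nat) (s m j : Nat) (h : j < m) :
    (((List.range' s m).map f).getD j none) = f (s + j) := by
  rw [List.getD_eq_getElem _ _ (by simp; omega)]
  simp [List.getElem_range']

lemma bestStep_eq (cs : List Char) (V : List (List Char)) (pos : Nat) (tbl : List (Option Nat))
    (hpos : pos < cs.length)
    (htbl : ∀ i, pos + 1 ≤ i → i ≤ cs.length → tbl.getD (i - pos - 1) none = pvBV cs V i) :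
    pvBestStep cs V pos tbl = pvBV cs V pos := by
  rw [pvBestStep]
  rw [PySem.List.foldl_congr_mem (List.range' (pos+1) (cs.length - pos)) _
    (fun (b : Option Nat) (i : Nat) =>
      pvRunMax b ((if pvSeg cs pos i ∈ V then (segsFrom cs V i).map (fun t => pvSeg cs pos i :: t) else []).map List.length))
    none
    (by
      intro b i hi
      rw [List.mem_range'_1] at hi
      show (if PySem.List.slice cs (some ((pos : Nat) : Int)) (some ((i : Nat) : Int)) ∈ V then
              match tbl.getD (i - pos - 1) none with
              | none => b
              | some v =>
                match b with
                | none => some (v + 1)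
                | some b0 => if b0 < v + 1 then some (v + 1) else some b0
            else b)
          = pvRunMax b ((if pvSeg cs pos i ∈ V then (segsFrom cs V i).map (fun t => pvSeg cs pos i :: t) else []).map List.length)
      rw [runMax_branch, slice_eq_pvSeg, htbl i (by omega) (by omega)]
      by_cases hs : pvSeg cs pos i ∈ V
      · rw [if_pos hs, if_pos hs]
        rcases pvBV cs V i with _ | v
        · rfl
        · cases b <;> rfl
      · rw [if_neg hs, if_neg hs])]
  rw [foldl_runMax_flatMap]
  show pvRunMax none _ = _
  rw [pvBV, segsFrom_eq, if_neg (by omega), List.nil_append]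

lemma bestList_eq (cs : List Char) (V : List (List Char)) :
    ∀ k, k ≤ cs.length →
      pvBestList cs V k = (List.range' (cs.length - k) (k + 1)).map (pvBV cs V) := by
  intro k
  induction k with
  | zero =>
    intro _
    have hbv : pvBV cs V cs.length = some 0 := by
      rw [pvBV, segsFrom_end cs V cs.length le_rfl]
      rfl
    rw [pvBestList]
    simp [List.range'_one, hbv]
  | succ k ih =>
    intro hk
    rw [pvBestList, ih (by omega)]
    have hstep : pvBestStep cs V (cs.length - (k+1)) ((List.range' (cs.length - k) (k + 1)).map (pvBV cs V))
        = pvBV cs V (cs.length - (k+1)) := by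
      apply bestStep_eq cs V (cs.length - (k+1)) _ (by omega)
      intro i h1 h2
      rw [getD_map_range' _ _ _ _ (by omega)]
      congr 1
      omega
    rw [hstep]
    have hr : List.range' (cs.length - (k+1)) (k + 1 + 1)
        = (cs.length - (k+1)) :: List.range' (cs.length - k) (k + 1) := by
      have harg : cs.length - (k+1) + 1 = cs.length - k := by omega
      rw [List.range'_succ, harg]
    rw [hr, List.map_cons]

lemma tbl_getD (cs : List Char) (V : List (List Char)) (pos : Nat) (h : pos ≤ cs.length) :
    (pvBestList cs V cs.length).getD pos none = pvBV cs V pos := by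
  rw [bestList_eq cs V cs.length le_rfl]
  have h0 : cs.length - cs.length = 0 := by omega
  rw [h0, getD_map_range' _ _ _ _ (by omega)]
  congr 1
  omega

-- ---- reconstruction ----
lemma find?_congr_mem {α : Type} (l : List α) (p q : α → Bool)
    (h : ∀ x ∈ l, p x = q x) : l.find? p = l.find? q := by
  induction l with
  | nil => rfl
  | cons a t ih =>
    have ha := h a List.mem_cons_self
    cases hq : q a with
    | true =>
      rw [List.find?_cons_of_pos (by rw [ha, hq]), List.find?_cons_of_pos hq]
    | false =>
      rw [List.find?_cons_of_neg (by rw [ha, hq]; simp), List.find?_cons_of_neg (by rw [hq]; simp)]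
      exact ih (fun x hx => h x (List.mem_cons_of_mem _ hx))

lemma fm_lemma (cs : List Char) (V : List (List Char)) (pos : Nat) (c : Nat) :
    ∀ (L : List Nat) (m : List (List Char)),
      (∀ i ∈ L, pos < i ∧ i ≤ cs.length) →
      PySem.List.max?
        (L.flatMap (fun i => if pvSeg cs pos i ∈ V then (segsFrom cs V i).map (fun t => pvSeg cs pos i :: t) else []))
        (fun x => x.length) = some m →
      c = m.length →
      ∃ i₀ m',
        L.find? (fun i =>
          decide (pvSeg cs pos i ∈ V) &&
          (match pvBV cs V i with
           | some v => v + 1 == c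
           | none => false)) = some i₀ ∧
        PySem.List.max? (segsFrom cs V i₀) (fun x => x.length) = some m' ∧
        m = pvSeg cs pos i₀ :: m' := by
  intro L
  induction L with
  | nil =>
    intro m _ hmax _
    simp [PySem.List.max?] at hmax
  | cons i t ih =>
    intro m hL hmax hc
    rw [List.flatMap_cons] at hmax
    by_cases hs : pvSeg cs pos i ∈ V
    · rw [if_pos hs] at hmax
      rcases hseg : segsFrom cs V i with _ | ⟨x, xs⟩
      · rw [hseg] at hmax
        simp only [List.map_nil, List.nil_append] at hmax
        have hbvi : pvBV cs V i = none := by rw [pvBV, hseg]; rfl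
        rw [List.find?_cons_of_neg (by rw [hbvi]; simp)]
        exact ih m (fun j hj => hL j (List.mem_cons_of_mem _ hj)) hmax hc
      · have hne : PySem.List.max? (segsFrom cs V i) (fun x => x.length) ≠ none := by
          intro hcontra
          rw [PySem.List.max?_eq_none_iff] at hcontra
          rw [hcontra] at hseg
          simp at hseg
        rcases hm1 : PySem.List.max? (segsFrom cs V i) (fun x => x.length) with _ | m₁
        · exact absurd hm1 hne
        · have hbvi : pvBV cs V i = some m₁.length := by
            rw [pvBV, ← max?_map_key, hm1]
            rfl
          rw [max?_append, max?_map_cons, hm1] at hmax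
          rcases hR : PySem.List.max?
              (t.flatMap (fun i => if pvSeg cs pos i ∈ V then (segsFrom cs V i).map (fun t => pvSeg cs pos i :: t) else []))
              (fun x => x.length) with _ | b
          · rw [hR] at hmax
            simp only [Option.map_some] at hmax
            have hm : m = pvSeg cs pos i :: m₁ := by
              cases hmax
              rfl
            refine ⟨i, m₁, ?_, hm1, hm⟩
            apply List.find?_cons_of_pos
            rw [hbvi]
            simp only [Bool.and_eq_true, decide_eq_true_eq]
            refine ⟨hs, ?_⟩
            have : m₁.length + 1 = c := by rw [hc, hm]; simp
            simp [this]
          · rw [hR] at hmax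
            simp only [Option.map_some] at hmax
            by_cases hlt : (pvSeg cs pos i :: m₁).length < b.length
            · rw [if_pos hlt] at hmax
              have hm : m = b := by cases hmax; rfl
              have hskip : ¬ (decide (pvSeg cs pos i ∈ V) &&
                  (match pvBV cs V i with
                   | some v => v + 1 == c
                   | none => false)) = true := by
                rw [hbvi]
                simp only [Bool.and_eq_true, decide_eq_true_eq]
                rintro ⟨-, hbeq⟩
                have heq : m₁.length + 1 = c := by simpa using hbeq
                have hlt' : m₁.length + 1 < b.length := by simpa using hlt
                rw [hc, hm] at heq
                omega
              rw [List.find?_cons_of_neg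
                (p := fun i => decide (pvSeg cs pos i ∈ V) &&
                  (match pvBV cs V i with
                   | some v => v + 1 == c
                   | none => false)) hskip]
              rw [← hm] at hR
              exact ih m (fun j hj => hL j (List.mem_cons_of_mem _ hj)) hR hc
            · rw [if_neg hlt] at hmax
              have hm : m = pvSeg cs pos i :: m₁ := by cases hmax; rfl
              refine ⟨i, m₁, ?_, hm1, hm⟩
              apply List.find?_cons_of_pos
              rw [hbvi]
              simp only [Bool.and_eq_true, decide_eq_true_eq]
              refine ⟨hs, ?_⟩
              have : m₁.length + 1 = c := by rw [hc, hm]; simp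
              simp [this]
    · rw [if_neg hs] at hmax
      rw [List.nil_append] at hmax
      rw [List.find?_cons_of_neg (by simp [hs])]
      exact ih m (fun j hj => hL j (List.mem_cons_of_mem _ hj)) hmax hc

lemma max?_single_nil :
    PySem.List.max? ([[]] : List (List (List Char))) (fun x => x.length) = some [] := by
  rfl

lemma rebuild_eq (cs : List Char) (V : List (List Char)) :
    ∀ (fuel pos : Nat) (out : List (List Char)) (m : List (List Char)),
      pos ≤ cs.length → cs.length ≤ fuel + pos →
      PySem.List.max? (segsFrom cs V pos) (fun x => x.length) = some m →
      pvRebuild cs V (pvBestList cs V cs.length) fuel pos out = out ++ m := by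
  intro fuel
  induction fuel with
  | zero =>
    intro pos out m h1 h2 hm
    rw [segsFrom_end cs V pos (by omega), max?_single_nil] at hm
    cases hm
    rw [pvRebuild]
    simp
  | succ f ih =>
    intro pos out m h1 h2 hm
    rw [pvRebuild]
    by_cases hp : pos < cs.length
    · rw [if_pos hp]
      have hbvpos : pvBV cs V pos = some m.length := by
        rw [pvBV, ← max?_map_key, hm]
        rfl
      have hm' : PySem.List.max?
          ((List.range' (pos+1) (cs.length - pos)).flatMap
            (fun i => if pvSeg cs pos i ∈ V then (segsFrom cs V i).map (fun t => pvSeg cs pos i :: t) else []))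
          (fun x => x.length) = some m := by
        rw [← hm, segsFrom_eq, if_neg (by omega), List.nil_append]
      obtain ⟨i₀, m', hfind, hmax', hmeq⟩ :=
        fm_lemma cs V pos m.length (List.range' (pos+1) (cs.length - pos)) m
          (by intro i hi; rw [List.mem_range'_1] at hi; omega) hm' rfl
      have hfind' : pvFind cs V (pvBestList cs V cs.length) pos = some i₀ := by
        rw [pvFind]
        rw [find?_congr_mem _ _
          (fun i =>
            decide (pvSeg cs pos i ∈ V) &&
            (match pvBV cs V i with
             | some v => v + 1 == m.length
             | none => false))
          (by
            intro i hi
            rw [List.mem_range'_1] at hi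
            rw [slice_eq_pvSeg, tbl_getD cs V i (by omega), tbl_getD cs V pos (by omega), hbvpos]
            rcases hbv : pvBV cs V i with _ | v <;> simp [hbv])]
        exact hfind
      rw [hfind']
      have hi₀ : pos < i₀ ∧ i₀ ≤ cs.length := by
        have hmem := List.mem_of_find?_eq_some hfind
        rw [List.mem_range'_1] at hmem
        omega
      show pvRebuild cs V (pvBestList cs V cs.length) f i₀
          (out ++ [PySem.List.slice cs (some ((pos : Nat) : Int)) (some ((i₀ : Nat) : Int))]) = out ++ m
      rw [slice_eq_pvSeg]
      rw [ih i₀ (out ++ [pvSeg cs pos i₀]) m' (by omega) (by omega) hmax']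
      rw [hmeq]
      simp
    · rw [if_neg hp]
      rw [segsFrom_end cs V pos (by omega), max?_single_nil] at hm
      cases hm
      simp

lemma coreB_eq (cs : List Char) (V : List (List Char)) :
    pvCoreB cs V = PySem.List.max? (segsFrom cs V 0) (fun x => x.length) := by
  show (if (pvBestList cs V cs.length).getD 0 none = none then none
        else some (pvRebuild cs V (pvBestList cs V cs.length) cs.length 0 []))
      = _
  rw [tbl_getD cs V 0 (by omega)]
  rcases h : PySem.List.max? (segsFrom cs V 0) (fun x => x.length) with _ | m
  · have hbv : pvBV cs V 0 = none := by
      have := max?_map_key (fun (x : List (List Char)) => x.length) (segsFrom cs V 0)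
      rw [h] at this
      rw [pvBV, ← this]
      rfl
    rw [if_pos hbv]
  · have hbv : pvBV cs V 0 = some m.length := by
      have := max?_map_key (fun (x : List (List Char)) => x.length) (segsFrom cs V 0)
      rw [h] at this
      rw [pvBV, ← this]
      rfl
    rw [if_neg (by rw [hbv]; simp)]
    rw [rebuild_eq cs V cs.length 0 [] m (by omega) (by omega) h]
    rfl

-- ===== VERDICT (by name: the statement is the Claim_ definition above) =====
theorem pinyin_split_spec : Claim_equal_pinyin_split := by
  intro pinyin valid_pinyin _ hpre
  unfold Spec_pinyin_split pinyin_split pinyin_split_alt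
  have hV : [] ∉ valid_pinyin.map String.toList := by
    intro h
    rcases List.mem_map.mp h with ⟨s, hs, hnil⟩
    exact hpre (by rwa [String.toList_eq_nil_iff.mp hnil] at hs)
  rw [coreA_eq _ _ hV, coreB_eq]
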